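-- pv_equiv track=rewrite | github.com/safianali/AdvenrtOfCodeArchive | 2021/17/17.py | getAllY
-- ===== SOURCE A (Python) =====
-- from collections import defaultdict
--
-- def getAllY(startGuess, endGuess, startArea, endArea):
--     stepsToGoal = defaultdict(set)
--
--     for x in range(startGuess, endGuess + 1):
--         curPos = steps = 0
--         curVel = x
--         noLongerApproaching = False
--
--         while not noLongerApproaching:
--             curPos += curVel
--             curVel -= 1
--             steps += 1
--
--             if (curPos >= startArea) and (curPos <= endArea):
--                 stepsToGoal[x].add(steps)
--             elif (curPos < startArea) and (curVel <= 0):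
--                 noLongerApproaching = True
--
--     return stepsToGoal
-- ===== SOURCE B (Python) =====
-- from collections import defaultdict
--
--
-- def getAllY(startGuess, endGuess, startArea, endArea):
--     # Sweep the step count n once; at step n the position of velocity x is
--     # n*x - n*(n-1)//2, so the velocities landing in the area at step n form
--     # one contiguous integer interval, computed by exact ceil/floor division.
--     if startGuess > endGuess:
--         return defaultdict(set)
--     res = {}
--     n = 1
--     while True:
--         t = n * (n - 1) // 2
--         if n > endGuess and n * endGuess - t < startArea:
--             break  # even the largest velocity is past the area and falling: done
--         lo = max(startGuess, -(-(startArea + t) // n))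
--         hi = min(endGuess, (endArea + t) // n)
--         for x in range(lo, hi + 1):
--             res.setdefault(x, set()).add(n)
--         n += 1
--     out = defaultdict(set)
--     for x in sorted(res):
--         out[x] = res[x]
--     return out
-- ===== Notes on version B (the rewrite author's own statement) =====
-- stated objective: alternative
-- what changed: A simulates every velocity's trajectory step by step (inner while loop per velocity); B sweeps the step count n once and, using pos(n,x)=n*x-n(n-1)/2, computes by exact ceil/floor division the contiguous interval of velocities that land in the target at step n, stopping once even the largest velocity is past the area and falling, then emits the defaultdict in sorted-key order.
import Mathlib
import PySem

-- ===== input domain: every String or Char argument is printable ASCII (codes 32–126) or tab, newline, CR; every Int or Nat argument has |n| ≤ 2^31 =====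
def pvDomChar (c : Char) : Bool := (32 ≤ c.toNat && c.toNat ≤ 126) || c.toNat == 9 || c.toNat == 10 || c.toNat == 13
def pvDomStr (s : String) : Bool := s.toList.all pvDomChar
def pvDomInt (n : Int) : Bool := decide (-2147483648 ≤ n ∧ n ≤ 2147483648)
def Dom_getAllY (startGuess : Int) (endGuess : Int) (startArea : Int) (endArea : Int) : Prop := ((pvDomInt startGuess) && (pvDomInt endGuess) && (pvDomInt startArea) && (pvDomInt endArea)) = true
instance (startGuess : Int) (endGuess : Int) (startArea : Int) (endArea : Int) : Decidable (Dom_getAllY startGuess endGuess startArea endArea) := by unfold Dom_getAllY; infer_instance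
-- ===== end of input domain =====

-- B replaces A's per-velocity step-by-step simulation by a single sweep over the
-- step count, computing the contiguous interval of velocities that land in the
-- area at each step by exact ceil/floor division (objective: alternative).

-- ===== PORT A =====
-- Fuel bound for A's while loop (the loop always ends: once the velocity is
-- ≤ 0 the position strictly decreases below startArea; pvMeasureA strictly
-- decreases at every iteration, so it bounds the number of iterations).
def pvTriNat : Nat → Nat
  | 0 => 0
  | n + 1 => pvTriNat n + (n + 1)

def pvMeasureA (startArea curPos curVel : Int) : Nat :=
  (curVel + 1).toNat + (curPos + (pvTriNat curVel.toNat : Int) - startArea).toNat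

-- The while loop of A (state: curPos, curVel, steps, the defaultdict).
-- 'stepsToGoal[x].add(steps)' (defaultdict(set)) is d.modify x [] (Set.add · steps).
-- The fuel only makes the recursion structural; it is never exhausted
-- (getAllY passes pvMeasureA startArea 0 x + 1, proved sufficient below).
def getAllYLoop : Nat → Int → Int → Int → Int → Int → Int →
    PySem.Dict Int (PySem.Set Int) → PySem.Dict Int (PySem.Set Int)
  | 0, _, _, _, _, _, _, d => d
  | fuel + 1, startArea, endArea, x, curPos, curVel, steps, d =>
    if startArea ≤ curPos + curVel ∧ curPos + curVel ≤ endArea then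
      getAllYLoop fuel startArea endArea x (curPos + curVel) (curVel - 1) (steps + 1)
        (d.modify x [] (fun st => PySem.Set.add st (steps + 1)))
    else if curPos + curVel < startArea ∧ curVel - 1 ≤ 0 then
      d
    else
      getAllYLoop fuel startArea endArea x (curPos + curVel) (curVel - 1) (steps + 1) d

def getAllY (startGuess : Int) (endGuess : Int) (startArea : Int) (endArea : Int) : List (Int × List Int) :=
  ((PySem.List.pyRange startGuess (endGuess + 1) 1).foldl
      (fun d x => getAllYLoop (pvMeasureA startArea 0 x + 1) startArea endArea x 0 x 0 d)
      PySem.Dict.empty).items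

-- ===== PORT B =====
-- position of initial velocity x after m steps: pvPos x m = m*x - m(m-1)/2
def pvPos (x m : Int) : Int := m * x - PySem.Int.floordiv (m * (m - 1)) 2

-- a step bound past which every trajectory with velocity ≤ endGuess is below
-- startArea; it bounds the number of iterations of B's while loop (fuel)
def pvBnd (eG sA : Int) : Int :=
  max (eG + 1) 1 + ((pvPos eG (max (eG + 1) 1) - sA + 1).toNat : Int)

-- B's while loop over the step count n.
-- 'res.setdefault(x, set()).add(n)' is d.modify x [] (Set.add · n).
-- The fuel only makes the recursion structural; it is never exhausted
-- (getAllY_alt passes (pvBnd endGuess startArea).toNat, proved sufficient below).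
def getAllYAltLoop : Nat → Int → Int → Int → Int → Int →
    PySem.Dict Int (PySem.Set Int) → PySem.Dict Int (PySem.Set Int)
  | 0, _, _, _, _, _, res => res
  | fuel + 1, startGuess, endGuess, startArea, endArea, n, res =>
    if endGuess < n ∧ n * endGuess - PySem.Int.floordiv (n * (n - 1)) 2 < startArea then
      res
    else
      getAllYAltLoop fuel startGuess endGuess startArea endArea (n + 1)
        ((PySem.List.pyRange
            (max startGuess (-(PySem.Int.floordiv (-(startArea + PySem.Int.floordiv (n * (n - 1)) 2)) n)))
            (min endGuess (PySem.Int.floordiv (endArea + PySem.Int.floordiv (n * (n - 1)) 2) n) + 1) 1).foldl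
          (fun d x => d.modify x [] (fun st => PySem.Set.add st n)) res)

-- final loop: a defaultdict(set) filled with the entries in sorted key order;
-- res[x] with x a key of res never raises, ported as getD.
def getAllY_alt (startGuess : Int) (endGuess : Int) (startArea : Int) (endArea : Int) : List (Int × List Int) :=
  if endGuess < startGuess then [] else
  let res := getAllYAltLoop (pvBnd endGuess startArea).toNat
    startGuess endGuess startArea endArea 1 PySem.Dict.empty
  ((PySem.List.sorted res.keys (fun k => k) false).foldl
      (fun out x => out.insert x (res.getD x [])) PySem.Dict.empty).items

-- ===== PRECONDITION & SPEC =====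
def Spec_getAllY (startGuess : Int) (endGuess : Int) (startArea : Int) (endArea : Int) (out : List (Int × List Int)) : Prop := out = getAllY_alt startGuess endGuess startArea endArea
instance (startGuess : Int) (endGuess : Int) (startArea : Int) (endArea : Int) (out : List (Int × List Int)) : Decidable (Spec_getAllY startGuess endGuess startArea endArea out) := by unfold Spec_getAllY; infer_instance

-- ===== CLAIM (what is proved, stated in full; the proofs are below) =====
def Claim_equal_getAllY : Prop := ∀ (startGuess : Int) (endGuess : Int) (startArea : Int) (endArea : Int), Dom_getAllY startGuess endGuess startArea endArea → Spec_getAllY startGuess endGuess startArea endArea (getAllY startGuess endGuess startArea endArea)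

-- ===== LEMMAS AND PROOFS =====

theorem pvMeasureA_dec (sA pos vel : Int) (h : ¬(pos + vel < sA ∧ vel - 1 ≤ 0)) :
    pvMeasureA sA (pos + vel) (vel - 1) < pvMeasureA sA pos vel := by
  unfold pvMeasureA
  by_cases hv : vel ≤ 0
  · have h0 : vel.toNat = 0 := by omega
    have h1 : (vel - 1).toNat = 0 := by omega
    rw [h0, h1]
    have : pvTriNat 0 = 0 := rfl
    rw [this]
    have hge : sA ≤ pos + vel := by omega
    omega
  · have h0 : vel.toNat = (vel - 1).toNat + 1 := by omega
    have h1 : pvTriNat vel.toNat = pvTriNat ((vel - 1).toNat) + ((vel - 1).toNat + 1) := by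
      rw [h0]; rfl
    omega

-- t(n+1) = t(n) + n for the running triangular term (n(n-1) is always even).
theorem pvTri_succ (n : Int) :
    PySem.Int.floordiv ((n + 1) * n) 2 = PySem.Int.floordiv (n * (n - 1)) 2 + n := by
  rw [PySem.Int.floordiv_eq_ediv_of_pos (by norm_num), PySem.Int.floordiv_eq_ediv_of_pos (by norm_num)]
  have h : (n + 1) * n = n * (n - 1) + n * 2 := by ring
  rw [h, Int.add_mul_ediv_right _ _ (by norm_num)]

theorem pvPos_zero (x : Int) : pvPos x 0 = 0 := by
  unfold pvPos
  have e : (0 : Int) * (0 - 1) = 0 := by ring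
  rw [e, PySem.Int.floordiv_eq_ediv_of_pos (by norm_num)]
  simp

theorem pvPos_succ (x m : Int) : pvPos x (m + 1) = pvPos x m + (x - m) := by
  unfold pvPos
  have e : (m + 1) * (m + 1 - 1) = (m + 1) * m := by ring
  rw [e, pvTri_succ]; ring

theorem pvPos_mono_x {x y : Int} (m : Int) (hm : 0 ≤ m) (hxy : x ≤ y) :
    pvPos x m ≤ pvPos y m := by
  unfold pvPos
  have := mul_le_mul_of_nonneg_left hxy hm
  omega

theorem pvPos_decr (x : Int) {n m : Int} (hx : x ≤ n) (hnm : n ≤ m) :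
    pvPos x m ≤ pvPos x n := by
  have key : ∀ k : Nat, pvPos x (n + k) ≤ pvPos x n := by
    intro k
    induction k with
    | zero => simp
    | succ k ih =>
        have e : n + ((k + 1 : Nat) : Int) = (n + (k : Int)) + 1 := by push_cast; ring
        rw [e, pvPos_succ]
        have : x - (n + (k : Int)) ≤ 0 := by omega
        omega
  have h := key (m - n).toNat
  have e : n + (((m - n).toNat : Nat) : Int) = m := by omega
  rw [e] at h
  exact h

theorem pvPos_down (x n0 : Int) (h : x + 1 ≤ n0) :
    ∀ k : Nat, pvPos x (n0 + k) ≤ pvPos x n0 - k := by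
  intro k
  induction k with
  | zero => simp
  | succ k ih =>
      have e : n0 + ((k + 1 : Nat) : Int) = (n0 + (k : Int)) + 1 := by push_cast; ring
      rw [e, pvPos_succ]
      have : x - (n0 + (k : Int)) ≤ -1 := by omega
      push_cast
      omega

theorem pvBnd_spec (eG sA : Int) :
    pvPos eG (pvBnd eG sA) < sA ∧ eG < pvBnd eG sA ∧ 1 ≤ pvBnd eG sA := by
  have h := pvPos_down eG (max (eG + 1) 1) (by omega) ((pvPos eG (max (eG + 1) 1) - sA + 1).toNat)
  unfold pvBnd
  refine ⟨by omega, by omega, by omega⟩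

-- the ascending list of matching steps in [n, B]
def pvSL (sA eA x n B : Int) : List Int :=
  (PySem.List.pyRange n (B + 1) 1).filter (fun m => decide (sA ≤ pvPos x m ∧ pvPos x m ≤ eA))

theorem pvSL_nodup (sA eA x n B : Int) : (pvSL sA eA x n B).Nodup :=
  List.Nodup.filter _ (PySem.List.nodup_pyRange_one _ _)

theorem pvSL_cons (sA eA x : Int) {n B : Int} (h : n ≤ B) :
    pvSL sA eA x n B =
      if sA ≤ pvPos x n ∧ pvPos x n ≤ eA then n :: pvSL sA eA x (n + 1) B
      else pvSL sA eA x (n + 1) B := by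
  unfold pvSL
  rw [PySem.List.pyRange_one_cons (by omega), List.filter_cons]
  split_ifs with h1 h2 h3 <;> simp_all

theorem pvSL_nil (sA eA x : Int) {n B : Int}
    (h : ∀ m, n ≤ m → m ≤ B → pvPos x m < sA) : pvSL sA eA x n B = [] := by
  unfold pvSL
  rw [List.filter_eq_nil_iff]
  intro m hm
  rw [PySem.List.mem_pyRange_one] at hm
  have := h m hm.1 (by omega)
  simp
  omega

-- dict helper: a fold of modifies at key x leaves every other key unchanged
theorem pvFoldModify_getD_ne (L : List Int) (x y : Int) (h : y ≠ x)
    (d : PySem.Dict Int (PySem.Set Int)) :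
    (L.foldl (fun d m => d.modify x [] (fun st => PySem.Set.add st m)) d).getD y []
      = d.getD y [] := by
  induction L generalizing d with
  | nil => rfl
  | cons m t ih =>
      simp only [List.foldl_cons]
      rw [ih]
      exact PySem.Dict.getD_modify_of_ne _ _ _ h

-- dict helper: a fold of fresh adds at key x appends the list
theorem pvFoldModify_getD_self (L : List Int) (x : Int)
    (d : PySem.Dict Int (PySem.Set Int)) (hnd : L.Nodup)
    (hdisj : ∀ m ∈ L, m ∉ d.getD x []) :
    (L.foldl (fun d m => d.modify x [] (fun st => PySem.Set.add st m)) d).getD x []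
      = d.getD x [] ++ L := by
  induction L generalizing d with
  | nil => simp
  | cons m t ih =>
      simp only [List.foldl_cons]
      have hmem : m ∉ d.getD x [] := hdisj m (by simp)
      rw [ih _ (List.Nodup.of_cons hnd) ?later]
      case later =>
        intro m' hm'
        rw [PySem.Dict.getD_modify_self]
        unfold PySem.Set.add
        split_ifs with hc
        · exact hdisj m' (by simp [hm'])
        · intro hmem'
          rcases List.mem_append.mp hmem' with h1 | h1
          · exact hdisj m' (by simp [hm']) h1
          · simp at h1
            subst h1
            exact (List.not_nodup_cons_of_mem hm') hnd
      rw [PySem.Dict.getD_modify_self]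
      unfold PySem.Set.add
      rw [if_neg (by simpa using hmem)]
      simp

theorem pvSet_add_mem {s : PySem.Set Int} {x : Int} (h : x ∈ s) : PySem.Set.add s x = s := by
  unfold PySem.Set.add
  rw [if_pos (by simpa using h)]

theorem pvSet_add_not_mem {s : PySem.Set Int} {x : Int} (h : x ∉ s) :
    PySem.Set.add s x = s ++ [x] := by
  unfold PySem.Set.add
  rw [if_neg (by simpa using h)]

theorem pvUpdate_const (x : Int) (s : PySem.Set Int) (L : List Int) (hL : L ≠ []) :
    PySem.Set.update s (L.map (fun _ => x)) = PySem.Set.add s x := by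
  induction L generalizing s with
  | nil => exact absurd rfl hL
  | cons m t ih =>
      simp only [List.map_cons]
      unfold PySem.Set.update at ih ⊢
      simp only [List.foldl_cons]
      by_cases ht : t = []
      · subst ht; simp
      · rw [ih _ ht]
        exact pvSet_add_mem ((PySem.Set.mem_add _ _ _).mpr (Or.inr rfl))

theorem pvMem_update (s : PySem.Set Int) (l : List Int) (y : Int) :
    y ∈ PySem.Set.update s l ↔ y ∈ s ∨ y ∈ l := by
  induction l generalizing s with
  | nil => simp [PySem.Set.update]
  | cons m t ih =>
      unfold PySem.Set.update at ih ⊢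
      simp only [List.foldl_cons]
      rw [ih]
      rw [PySem.Set.mem_add]
      simp
      tauto

-- inner fold of B: each key of the range gets n appended once
theorem pvInner_getD (l : List Int) (hnd : l.Nodup) (n : Int)
    (d : PySem.Dict Int (PySem.Set Int)) (y : Int) :
    ((l.foldl (fun d x => d.modify x [] (fun st => PySem.Set.add st n)) d).getD y [])
      = if y ∈ l then PySem.Set.add (d.getD y []) n else d.getD y [] := by
  induction l generalizing d with
  | nil => simp
  | cons x t ih =>
      simp only [List.foldl_cons]
      rw [ih (List.Nodup.of_cons hnd)]
      by_cases hyx : y = x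
      · subst hyx
        have hyt : y ∉ t := (List.nodup_cons.mp hnd).1
        rw [if_neg hyt, if_pos (by simp)]
        rw [PySem.Dict.getD_modify_self]
      · rw [PySem.Dict.getD_modify_of_ne _ _ _ hyx]
        by_cases hyt : y ∈ t <;> simp [hyt, hyx]



-- A's while loop from a coherent state (pvPos x n, x - n, n) collects exactly
-- the matching steps in (n, B], for any B past the stopping point and any
-- sufficient fuel.
theorem pvAloop (sA eA x B : Int) (hB : pvPos x B < sA ∧ x ≤ B) :
    ∀ (fuel : Nat) (n : Int) (d : PySem.Dict Int (PySem.Set Int)), 0 ≤ n → n < B →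
    pvMeasureA sA (pvPos x n) (x - n) + 1 ≤ fuel →
    getAllYLoop fuel sA eA x (pvPos x n) (x - n) n d
      = (pvSL sA eA x (n + 1) B).foldl (fun d m => d.modify x [] (fun st => PySem.Set.add st m)) d := by
  intro fuel
  induction fuel with
  | zero => intro n d h0 hlt hf; omega
  | succ f ih =>
      intro n d h0 hlt hf
      simp only [getAllYLoop]
      rw [show pvPos x n + (x - n) = pvPos x (n + 1) from (pvPos_succ x n).symm]
      rw [show x - n - 1 = x - (n + 1) from by ring]
      split_ifs with h1 h2
      · -- step n+1 lands in the area: record it and continue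
        have hdec := pvMeasureA_dec sA (pvPos x n) (x - n) ?nostop
        case nostop =>
          rw [show pvPos x n + (x - n) = pvPos x (n + 1) from (pvPos_succ x n).symm]
          omega
        rw [show pvPos x n + (x - n) = pvPos x (n + 1) from (pvPos_succ x n).symm,
            show x - n - 1 = x - (n + 1) from by ring] at hdec
        have hlt1 : n + 1 < B := by
          rcases lt_or_eq_of_le (show n + 1 ≤ B by omega) with h | h
          · exact h
          · rw [h] at h1; omega
        rw [ih (n + 1) _ (by omega) hlt1 (by omega)]
        rw [pvSL_cons sA eA x (show n + 1 ≤ B by omega), if_pos h1]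
        simp only [List.foldl_cons]
      · -- below the area and falling: stop; no step ≥ n+1 can match
        rw [pvSL_nil sA eA x ?later]
        case later =>
          intro m hm _
          calc pvPos x m ≤ pvPos x (n + 1) := pvPos_decr x (by omega) hm
            _ < sA := h2.1
        rfl
      · -- still approaching: continue without recording
        have hdec := pvMeasureA_dec sA (pvPos x n) (x - n) ?nostop2
        case nostop2 =>
          rw [show pvPos x n + (x - n) = pvPos x (n + 1) from (pvPos_succ x n).symm,
              show x - n - 1 = x - (n + 1) from by ring]
          exact h2
        rw [show pvPos x n + (x - n) = pvPos x (n + 1) from (pvPos_succ x n).symm,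
            show x - n - 1 = x - (n + 1) from by ring] at hdec
        have hlt1 : n + 1 < B := by
          rcases lt_or_eq_of_le (show n + 1 ≤ B by omega) with h | h
          · exact h
          · exfalso; rw [h] at h2; exact h2 ⟨hB.1, by omega⟩
        rw [ih (n + 1) _ (by omega) hlt1 (by omega)]
        rw [pvSL_cons sA eA x (show n + 1 ≤ B by omega), if_neg h1]

-- A's outer loop: keys are the velocities with a nonempty match list (in
-- ascending order) and each key maps to its ascending match list.
theorem pvAfold (sG eG sA eA B : Int) (hB1 : pvPos eG B < sA) (hBe : eG < B) (hB0 : 1 ≤ B) :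
    ∀ (mE : Int) (_hge : sG ≤ mE), mE ≤ eG + 1 →
      (((PySem.List.pyRange sG mE 1).foldl (fun d x => getAllYLoop (pvMeasureA sA 0 x + 1) sA eA x 0 x 0 d)
          PySem.Dict.empty).keys
        = (PySem.List.pyRange sG mE 1).filter (fun x => decide (pvSL sA eA x 1 B ≠ [])))
      ∧ ∀ y, ((PySem.List.pyRange sG mE 1).foldl (fun d x => getAllYLoop (pvMeasureA sA 0 x + 1) sA eA x 0 x 0 d)
          PySem.Dict.empty).getD y []
            = if sG ≤ y ∧ y < mE then pvSL sA eA y 1 B else [] := by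
  intro mE hge
  induction mE, hge using Int.le_induction with
  | base =>
      intro _
      rw [PySem.List.pyRange_one_eq_nil (by omega)]
      refine ⟨by simp [PySem.Dict.keys_empty], ?_⟩
      intro y
      rw [if_neg (by omega)]
      simp [PySem.Dict.getD_empty]
  | succ n hn ih =>
      intro hle
      obtain ⟨ihk, ihg⟩ := ih (by omega)
      rw [PySem.List.pyRange_one_succ_right hn, List.foldl_append, List.filter_append]
      simp only [List.foldl_cons, List.foldl_nil]
      set D := (PySem.List.pyRange sG n 1).foldl (fun d x => getAllYLoop (pvMeasureA sA 0 x + 1) sA eA x 0 x 0 d)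
        PySem.Dict.empty with hD
      -- n is a fresh key of D
      have hfresh : n ∉ D.keys := by
        rw [ihk]
        intro hmem
        have := (PySem.List.mem_pyRange_one).mp (List.mem_of_mem_filter hmem)
        omega
      have hcont : D.contains n = false := by
        rcases Bool.eq_false_or_eq_true (D.contains n) with h | h
        · exact absurd ((PySem.Dict.contains_iff_mem_keys D n).mp h) hfresh
        · exact h
      -- the x = n iteration, via pvAloop at the initial state
      have hx : getAllYLoop (pvMeasureA sA 0 n + 1) sA eA n 0 n 0 D
          = (pvSL sA eA n 1 B).foldl (fun d m => d.modify n [] (fun st => PySem.Set.add st m)) D := by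
        have hstop : pvPos n B < sA ∧ n ≤ B :=
          ⟨lt_of_le_of_lt (pvPos_mono_x B (by omega) (by omega : n ≤ eG)) hB1, by omega⟩
        have h0 := pvAloop sA eA n B hstop (pvMeasureA sA 0 n + 1) 0 D le_rfl (by omega)
          (by rw [pvPos_zero, sub_zero])
        rw [pvPos_zero, sub_zero] at h0
        norm_num at h0
        exact h0
      rw [hx]
      constructor
      · -- keys
        rw [PySem.Dict.keys_foldl_modify_key (pvSL sA eA n 1 B) (fun _ => n) []
             (fun _ m => fun st => PySem.Set.add st m) D]
        by_cases hS : pvSL sA eA n 1 B = []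
        · rw [hS]
          simp only [List.map_nil]
          rw [ihk]
          have : (fun x => decide (pvSL sA eA x 1 B ≠ [])) n = false := by simp [hS]
          simp [List.filter_cons, PySem.Set.update]
          exact hS
        · rw [show (pvSL sA eA n 1 B).map (fun _ => n) = (pvSL sA eA n 1 B).map (fun _ => n) from rfl]
          rw [pvUpdate_const n D.keys _ hS]
          rw [pvSet_add_not_mem hfresh, ihk]
          have : (fun x => decide (pvSL sA eA x 1 B ≠ [])) n = true := by simp [hS]
          simp [List.filter_cons]
          exact hS
      · -- getD
        intro y
        by_cases hy : y = n
        · subst hy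
          have hD0 : D.getD y [] = [] := PySem.Dict.getD_of_not_contains D [] hcont
          rw [pvFoldModify_getD_self _ _ _ (pvSL_nodup sA eA y 1 B)
               (by intro m _; rw [hD0]; simp)]
          rw [hD0, List.nil_append, if_pos (by omega)]
        · rw [pvFoldModify_getD_ne _ _ _ hy, ihg y]
          by_cases hc : sG ≤ y ∧ y < n
          · rw [if_pos hc, if_pos (by omega)]
          · rw [if_neg hc, if_neg (by omega)]


-- B's ceil/floor divisions bracket exactly the velocities hitting the area at step n
theorem pvBracket (sG eG sA eA n x : Int) (hn : 1 ≤ n) :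
    (max sG (-(PySem.Int.floordiv (-(sA + PySem.Int.floordiv (n * (n - 1)) 2)) n)) ≤ x ∧
     x < min eG (PySem.Int.floordiv (eA + PySem.Int.floordiv (n * (n - 1)) 2) n) + 1)
    ↔ (sG ≤ x ∧ x ≤ eG ∧ (sA ≤ pvPos x n ∧ pvPos x n ≤ eA)) := by
  have h0 : (0 : Int) < n := hn
  set t := PySem.Int.floordiv (n * (n - 1)) 2 with ht
  have hhi : x ≤ PySem.Int.floordiv (eA + t) n ↔ x * n ≤ eA + t :=
    PySem.Int.le_floordiv_iff_mul_le h0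
  have hlo : -(PySem.Int.floordiv (-(sA + t)) n) ≤ x ↔ sA + t ≤ x * n := by
    rw [neg_le, PySem.Int.le_floordiv_iff_mul_le h0]
    have e : -x * n = -(x * n) := by ring
    rw [e]
    omega
  unfold pvPos
  rw [← ht]
  have e : n * x = x * n := mul_comm n x
  omega

-- B's while loop from step n appends, to each velocity in [sG, eG], its
-- matching steps in [n, B], for any B past the global stopping point, with
-- fuel exactly covering the remaining steps up to B.
theorem pvBloop (sG eG sA eA B : Int) (hB1 : pvPos eG B < sA) (hBe : eG < B) :
    ∀ (fuel : Nat) (n : Int) (d : PySem.Dict Int (PySem.Set Int)), 1 ≤ n → n ≤ B →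
    (B + 1 - n).toNat = fuel →
    (∀ y m, m ∈ d.getD y [] → m < n) →
    (∀ y, (getAllYAltLoop fuel sG eG sA eA n d).getD y []
        = d.getD y [] ++ (if sG ≤ y ∧ y ≤ eG then pvSL sA eA y n B else []))
    ∧ (∀ y, y ∈ (getAllYAltLoop fuel sG eG sA eA n d).keys
        ↔ y ∈ d.keys ∨ (sG ≤ y ∧ y ≤ eG ∧ pvSL sA eA y n B ≠ []))
    ∧ (d.keys.Nodup → (getAllYAltLoop fuel sG eG sA eA n d).keys.Nodup) := by
  intro fuel
  induction fuel with
  | zero => intro n d h1 hnB hk hinv; omega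
  | succ k ih =>
      intro n d h1 hnB hk hinv
      simp only [getAllYAltLoop]
      split_ifs with hstop
      · -- stopped: nothing at this or any later step
        have hsn : pvPos eG n < sA := by unfold pvPos; exact hstop.2
        have hnil : ∀ y, y ≤ eG → pvSL sA eA y n B = [] := by
          intro y hy
          apply pvSL_nil
          intro m hm hmB
          calc pvPos y m ≤ pvPos eG m := pvPos_mono_x m (by omega) hy
            _ ≤ pvPos eG n := pvPos_decr eG (by omega) hm
            _ < sA := hsn
        refine ⟨?_, ?_, fun h => h⟩
        · intro y
          by_cases hr : sG ≤ y ∧ y ≤ eG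
          · rw [if_pos hr, hnil y hr.2]; simp
          · rw [if_neg hr]; simp
        · intro y
          by_cases hr : sG ≤ y ∧ y ≤ eG
          · simp [hnil y hr.2]
          · tauto
      · -- one more sweep at step n, then the tail by induction
        have hnltB : n < B := by
          rcases lt_or_eq_of_le hnB with h | h
          · exact h
          · exfalso
            rw [h] at hstop
            exact hstop ⟨hBe, by unfold pvPos at hB1; exact hB1⟩
        set inner := PySem.List.pyRange
            (max sG (-(PySem.Int.floordiv (-(sA + PySem.Int.floordiv (n * (n - 1)) 2)) n)))
            (min eG (PySem.Int.floordiv (eA + PySem.Int.floordiv (n * (n - 1)) 2) n) + 1) 1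
          with hinner
        have hinn : ∀ x, x ∈ inner ↔ (sG ≤ x ∧ x ≤ eG ∧ (sA ≤ pvPos x n ∧ pvPos x n ≤ eA)) := by
          intro x
          rw [hinner, PySem.List.mem_pyRange_one]
          exact pvBracket sG eG sA eA n x h1
        have hinnnd : inner.Nodup := PySem.List.nodup_pyRange_one _ _
        set d' := inner.foldl (fun d x => d.modify x [] (fun st => PySem.Set.add st n)) d with hd'
        have hgetD' : ∀ y, d'.getD y []
            = if y ∈ inner then d.getD y [] ++ [n] else d.getD y [] := by
          intro y
          rw [hd', pvInner_getD inner hinnnd n d y]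
          by_cases hy : y ∈ inner
          · rw [if_pos hy, if_pos hy, pvSet_add_not_mem (fun hmem => by have := hinv y n hmem; omega)]
          · rw [if_neg hy, if_neg hy]
        have hinv' : ∀ y m, m ∈ d'.getD y [] → m < n + 1 := by
          intro y m hm
          rw [hgetD' y] at hm
          by_cases hy : y ∈ inner
          · rw [if_pos hy] at hm
            rcases List.mem_append.mp hm with h | h
            · have := hinv y m h; omega
            · simp at h; omega
          · rw [if_neg hy] at hm
            have := hinv y m hm; omega
        have hkeys' : ∀ y, y ∈ d'.keys ↔ y ∈ d.keys ∨ y ∈ inner := by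
          intro y
          rw [hd', PySem.Dict.keys_foldl_modify_key inner (fun x => x) []
                (fun _ x => fun st => PySem.Set.add st n) d]
          rw [List.map_id']
          exact pvMem_update d.keys inner y
        have hnd' : d.keys.Nodup → d'.keys.Nodup := by
          intro h
          rw [hd']
          exact PySem.Dict.nodup_keys_foldl_modify_key inner (fun x => x) []
            (fun _ x => fun st => PySem.Set.add st n) d h
        obtain ⟨g2, k2, nd2⟩ := ih (n + 1) d' (by omega) (by omega) (by omega) hinv'
        have hpeel : ∀ y, pvSL sA eA y n B =
            if sA ≤ pvPos y n ∧ pvPos y n ≤ eA then n :: pvSL sA eA y (n + 1) B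
            else pvSL sA eA y (n + 1) B := fun y => pvSL_cons sA eA y (by omega)
        refine ⟨?_, ?_, fun h => nd2 (hnd' h)⟩
        · intro y
          rw [g2 y, hgetD' y, hpeel y]
          by_cases hr : sG ≤ y ∧ y ≤ eG
          · by_cases hA : sA ≤ pvPos y n ∧ pvPos y n ≤ eA
            · rw [if_pos ((hinn y).mpr ⟨hr.1, hr.2, hA⟩), if_pos hr, if_pos hr, if_pos hA]
              simp
            · rw [if_neg (fun hmem => hA ((hinn y).mp hmem).2.2), if_pos hr, if_pos hr, if_neg hA]
          · rw [if_neg (fun hmem => hr ⟨((hinn y).mp hmem).1, ((hinn y).mp hmem).2.1⟩),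
                if_neg hr, if_neg hr]
        · intro y
          rw [k2 y, hkeys' y, hpeel y]
          by_cases hr : sG ≤ y ∧ y ≤ eG
          · by_cases hA : sA ≤ pvPos y n ∧ pvPos y n ≤ eA
            · have : y ∈ inner := (hinn y).mpr ⟨hr.1, hr.2, hA⟩
              rw [if_pos hA]
              simp [this, hr.1, hr.2]
              try tauto
            · have : y ∉ inner := fun hmem => hA ((hinn y).mp hmem).2.2
              rw [if_neg hA]
              simp [this]
              try tauto
          · have : y ∉ inner := fun hmem => hr ⟨((hinn y).mp hmem).1, ((hinn y).mp hmem).2.1⟩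
            simp [this]
            try tauto

-- ===== VERDICT (by name: the statement is the Claim_ definition above) =====
theorem getAllY_spec : Claim_equal_getAllY := by
  intro sG eG sA eA _
  unfold Spec_getAllY
  by_cases hrange : eG < sG
  · -- empty velocity range: both sides are the empty dict
    have hBeq : getAllY_alt sG eG sA eA = [] := by
      show (if eG < sG then ([] : List (Int × List Int)) else _) = []
      rw [if_pos hrange]
    rw [hBeq]
    unfold getAllY
    rw [PySem.List.pyRange_one_eq_nil (by omega)]
    rfl
  · obtain ⟨hB1, hBe, hB0⟩ := pvBnd_spec eG sA
    set B := pvBnd eG sA with hB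
    -- B side: characterize res and rewrite the output
    have hBeq : getAllY_alt sG eG sA eA
        = ((PySem.List.sorted (getAllYAltLoop (pvBnd eG sA).toNat sG eG sA eA 1 PySem.Dict.empty).keys
              (fun k => k) false).foldl
            (fun out x => out.insert x
              ((getAllYAltLoop (pvBnd eG sA).toNat sG eG sA eA 1 PySem.Dict.empty).getD x []))
            PySem.Dict.empty).items := by
      show (if eG < sG then ([] : List (Int × List Int)) else _) = _
      rw [if_neg hrange]
    rw [hBeq]
    set res := getAllYAltLoop (pvBnd eG sA).toNat sG eG sA eA 1 PySem.Dict.empty with hres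
    obtain ⟨hg, hk, hnd⟩ := pvBloop sG eG sA eA B hB1 hBe (pvBnd eG sA).toNat 1 PySem.Dict.empty
      le_rfl (by omega) (by omega)
      (by intro y m hm; rw [PySem.Dict.getD_empty] at hm; simp at hm)
    have hgetD : ∀ y, res.getD y [] = if sG ≤ y ∧ y ≤ eG then pvSL sA eA y 1 B else [] := by
      intro y
      have := hg y
      rwa [PySem.Dict.getD_empty, List.nil_append] at this
    have hmem : ∀ y, y ∈ res.keys ↔ (sG ≤ y ∧ y ≤ eG ∧ pvSL sA eA y 1 B ≠ []) := by
      intro y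
      rw [hres, hk y, PySem.Dict.keys_empty]
      simp
    have hndk : res.keys.Nodup := hnd PySem.Dict.nodup_keys_empty
    set F := (PySem.List.pyRange sG (eG + 1) 1).filter
        (fun x => decide (pvSL sA eA x 1 B ≠ [])) with hF
    have hFnodup : F.Nodup := List.Nodup.filter _ (PySem.List.nodup_pyRange_one sG (eG + 1))
    have hFmem : ∀ y, y ∈ F ↔ (sG ≤ y ∧ y ≤ eG ∧ pvSL sA eA y 1 B ≠ []) := by
      intro y
      rw [hF, List.mem_filter, PySem.List.mem_pyRange_one]
      simp only [decide_eq_true_eq]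
      constructor
      · rintro ⟨⟨ha, hb⟩, hc⟩
        exact ⟨ha, by omega, hc⟩
      · rintro ⟨ha, hb, hc⟩
        exact ⟨⟨ha, by omega⟩, hc⟩
    have hsorted : PySem.List.sorted res.keys (fun k => k) false = F := by
      apply PySem.List.sorted_eq_of_perm_of_pairwise_lt
      · exact (List.perm_ext_iff_of_nodup hFnodup hndk).mpr (fun a => by rw [hFmem a, hmem a])
      · exact List.Pairwise.filter _ (PySem.List.pairwise_lt_pyRange_one sG (eG + 1))
    rw [hsorted]
    rw [PySem.Dict.items_foldl_insert_fresh F (fun x => x) (fun x => res.getD x [])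
          PySem.Dict.empty (fun a _ => PySem.Dict.contains_empty a)
          (by rw [List.map_id']; exact hFnodup)]
    -- A side
    unfold getAllY
    obtain ⟨hak, hag⟩ := pvAfold sG eG sA eA B hB1 hBe hB0 (eG + 1) (by omega) le_rfl
    rw [← hF] at hak
    rw [PySem.Dict.items_eq_map_keys _ (hak ▸ hFnodup) ([] : PySem.Set Int), hak]
    have hempty : (PySem.Dict.empty : PySem.Dict Int (PySem.Set Int)).items = [] := rfl
    rw [hempty, List.nil_append]
    apply List.map_congr_left
    intro a ha
    have hmemF := (hFmem a).mp ha
    rw [hag a, hgetD a, if_pos (by omega), if_pos (by omega)]
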